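-- pv_equiv track=rewrite | github.com/hebutBryant/rag_interview | utils/base.py | escape_str
-- ===== SOURCE A (Python) =====
-- def escape_str(value: str) -> str:
--     if not value or len(value) == 0:
--         return value
--
--     patterns = {
--         '"': "",
--         "{": "",
--         "}": "",
--     }
--     for pattern in patterns:
--         if pattern in value:
--             value = value.replace(pattern, patterns[pattern])
--     if value[0] == " " or value[-1] == " ":
--         value = value.strip()
--     value = " ".join(value.split())
--     return value
-- ===== SOURCE B (Python) =====
-- def escape_str(value: str) -> str:
--     if not value:
--         return value
--     out = []
--     pending = False
--     for c in value:
--         if c in '"{}':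
--             continue
--         if c.isspace():
--             if out:
--                 pending = True
--         else:
--             if pending:
--                 out.append(' ')
--                 pending = False
--             out.append(c)
--     return ''.join(out)
-- ===== Notes on version B (the rewrite author's own statement) =====
-- stated objective: alternative
-- what changed: B replaces A's three-pass replace() chain plus conditional strip() plus split()/join() with a single character-at-a-time pass maintaining an output list and a pending-space flag.
-- outside the precondition, e.g. on escape_str('"'): A raises IndexError, B returns ''; on escape_str('{'): A raises IndexError, B returns ''; on escape_str('}'): A raises IndexError, B returns ''
import Mathlib
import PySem

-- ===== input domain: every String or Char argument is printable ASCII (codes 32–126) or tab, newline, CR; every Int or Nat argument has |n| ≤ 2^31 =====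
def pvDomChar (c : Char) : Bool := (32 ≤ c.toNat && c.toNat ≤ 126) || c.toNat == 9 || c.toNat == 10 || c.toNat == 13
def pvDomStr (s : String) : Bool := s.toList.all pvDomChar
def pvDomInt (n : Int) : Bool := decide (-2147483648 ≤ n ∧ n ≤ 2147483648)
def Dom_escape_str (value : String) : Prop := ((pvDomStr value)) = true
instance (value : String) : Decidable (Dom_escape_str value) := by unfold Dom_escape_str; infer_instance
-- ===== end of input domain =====

-- B fuses A's replace-chain + conditional strip() + split/join into one character pass with a pending-space flag (alternative decomposition, same return value).


-- ===== PORT A =====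
def escape_str (value : String) : String :=
  if value.toList.isEmpty then value else
  -- for pattern in patterns: if pattern in value: value = value.replace(pattern, patterns[pattern])
  let v1 := [((['"'] : List Char), ([] : List Char)), (['{'], []), (['}'], [])].foldl
      (fun v p => if PySem.Chars.isIn p.1 v then PySem.Chars.replace v p.1 p.2 else v) value.toList
  -- value[0] / value[-1]: Python raises IndexError when v1 = []; that input is excluded by Pre_escape_str,
  -- so the defaulted read (pyGetD) is exact on every admitted input
  let v2 := if PySem.List.pyGetD v1 0 'A' = ' ' ∨ PySem.List.pyGetD v1 (-1) 'A' = ' '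
            then PySem.Chars.strip v1 else v1
  String.ofList (PySem.Chars.join [' '] (PySem.Chars.split₀ v2))

-- ===== PORT B =====
def escape_str_alt (value : String) : String :=
  if value.toList.isEmpty then value else
  String.ofList (value.toList.foldl
    (fun (st : List Char × Bool) c =>
      if c ∈ (['"','{','}'] : List Char) then st
      else if PySem.Chars.isspace c then (st.1, if st.1.isEmpty then st.2 else true)
      else (st.1 ++ (if st.2 then [' ', c] else [c]), false))
    ([], false)).1

-- ===== PRECONDITION & SPEC =====
-- Pre_ excludes exactly the nonempty strings made only of the characters '"' '{' '}' — on those A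
-- raises IndexError (value[0] after every character was removed); it admits every input A returns on.
def Pre_escape_str (value : String) : Prop :=
  value = "" ∨ value.toList.any (fun c => !(c == '"' || c == '{' || c == '}')) = true
instance (value : String) : Decidable (Pre_escape_str value) := by unfold Pre_escape_str; infer_instance
def pvWitness_escape_str : String := " a  {b} "

def Spec_escape_str (value : String) (out : String) : Prop := out = escape_str_alt value
instance (value : String) (out : String) : Decidable (Spec_escape_str value out) := by unfold Spec_escape_str; infer_instance

-- ===== CLAIM (what is proved, stated in full; the proofs are below) =====
def Claim_equal_escape_str : Prop := ∀ (value : String), Dom_escape_str value → Pre_escape_str value → Spec_escape_str value (escape_str value)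

-- ===== LEMMAS AND PROOFS =====

-- L1/L2: replace of a single char by "" is filter
theorem replace_go_singleton (p : Char) : ∀ (fuel : Nat) (l acc : List Char), l.length ≤ fuel →
    PySem.Chars.replace.go [p] [] fuel l acc = acc.reverse ++ l.filter (fun c => !(c == p)) := by
  intro fuel
  induction fuel with
  | zero => intro l acc h; cases l with
    | nil => simp [PySem.Chars.replace.go]
    | cons c t => simp at h
  | succ n ih =>
    intro l acc h
    cases l with
    | nil => simp [PySem.Chars.replace.go]
    | cons c t =>
      simp only [PySem.Chars.replace.go]
      by_cases hc : c = p
      · subst hc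
        have : List.isPrefixOf [c] (c :: t) = true := by simp [List.isPrefixOf]
        simp only [this, if_pos]
        rw [ih] <;> simp_all
      · have : List.isPrefixOf [p] (c :: t) = false := by
          simp [List.isPrefixOf]; intro h'; exact absurd h'.symm hc
        simp only [this]
        rw [ih t (c :: acc) (by simp at h ⊢; omega)]
        simp [hc]

theorem replace_singleton (p : Char) (l : List Char) :
    PySem.Chars.replace l [p] [] = l.filter (fun c => !(c == p)) := by
  simp [PySem.Chars.replace, replace_go_singleton p l.length l [] le_rfl]

theorem stepA_eq_filter (p : Char) (l : List Char) :
    (if PySem.Chars.isIn [p] l then PySem.Chars.replace l [p] [] else l)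
      = l.filter (fun c => !(c == p)) := by
  by_cases h : PySem.Chars.isIn [p] l = true
  · simp [h, replace_singleton]
  · have hni : p ∉ l := by
      intro hm
      exact h (PySem.Chars.isIn_iff_infix [p] l |>.mpr ((List.singleton_infix_iff p l).mpr hm))
    simp only [Bool.not_eq_true] at h
    simp [h]
    rw [eq_comm, List.filter_eq_self]
    intro a ha; simp; intro hap; exact hni (hap ▸ ha)

-- split₀ ignores leading whitespace
theorem split₀_go_dropWhile : ∀ (l : List Char) (acc : List (List Char)),
    PySem.Chars.split₀.go (List.dropWhile PySem.Chars.isspace l) [] acc = PySem.Chars.split₀.go l [] acc := by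
  intro l
  induction l with
  | nil => intro acc; simp
  | cons c t ih =>
    intro acc
    by_cases hc : PySem.Chars.isspace c = true
    · simp [List.dropWhile, hc, PySem.Chars.split₀.go, ih]
    · simp at hc; simp [List.dropWhile, hc, PySem.Chars.split₀.go]

theorem split₀_go_spaces : ∀ (w : List Char), (∀ c ∈ w, PySem.Chars.isspace c = true) →
    ∀ (acc : List (List Char)), PySem.Chars.split₀.go w [] acc = acc.reverse := by
  intro w
  induction w with
  | nil => intro _ acc; simp [PySem.Chars.split₀.go]
  | cons c t ih =>
    intro hw acc
    simp only [PySem.Chars.split₀.go, hw c (by simp), if_pos, List.isEmpty_nil]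
    exact ih (fun x hx => hw x (by simp [hx])) acc

-- split₀ ignores trailing whitespace
theorem split₀_go_append_spaces (w : List Char) (hw : ∀ c ∈ w, PySem.Chars.isspace c = true) :
    ∀ (l : List Char) (cur : List Char) (acc : List (List Char)),
    PySem.Chars.split₀.go (l ++ w) cur acc = PySem.Chars.split₀.go l cur acc := by
  intro l
  induction l with
  | nil =>
    intro cur acc
    induction w with
    | nil => simp
    | cons c t ihw =>
      have hc := hw c (by simp)
      have ht : ∀ x ∈ t, PySem.Chars.isspace x = true := fun x hx => hw x (by simp [hx])
      by_cases hcur : cur.isEmpty <;>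
        simp [PySem.Chars.split₀.go, hc, hcur, split₀_go_spaces t ht]
  | cons c t ih =>
    intro cur acc
    simp only [List.cons_append, PySem.Chars.split₀.go]
    by_cases hc : PySem.Chars.isspace c = true <;> by_cases hcur : cur.isEmpty <;> simp [hc, hcur, ih]

theorem split₀_strip (l : List Char) :
    PySem.Chars.split₀ (PySem.Chars.strip l) = PySem.Chars.split₀ l := by
  have hl : PySem.Chars.split₀ (PySem.Chars.lstrip l) = PySem.Chars.split₀ l := by
    simp [PySem.Chars.split₀, PySem.Chars.lstrip, split₀_go_dropWhile]
  have hr : ∀ (x : List Char), PySem.Chars.split₀ (PySem.Chars.rstrip x) = PySem.Chars.split₀ x := by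
    intro x
    have hx : x = PySem.Chars.rstrip x ++ (List.takeWhile PySem.Chars.isspace x.reverse).reverse := by
      simp only [PySem.Chars.rstrip]
      rw [← List.reverse_append, List.takeWhile_append_dropWhile, List.reverse_reverse]
    conv_rhs => rw [hx]
    simp only [PySem.Chars.split₀]
    rw [split₀_go_append_spaces _ (fun c hc => List.mem_takeWhile_imp (by simpa using hc))]
  rw [PySem.Chars.strip, hr, hl]

theorem pv_intercalate_cons (sep x : List Char) (xs : List (List Char)) :
    List.intercalate sep (x::xs) = x ++ if xs = [] then [] else sep ++ List.intercalate sep xs := by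
  cases xs <;> simp [List.intercalate, List.intersperse]

theorem pv_intercalate_snoc (sep w : List Char) :
    ∀ (ws : List (List Char)), ws ≠ [] →
    List.intercalate sep (ws ++ [w]) = List.intercalate sep ws ++ sep ++ w := by
  intro ws
  induction ws with
  | nil => intro h; exact absurd rfl h
  | cons x xs ih =>
    intro _
    cases hxs : xs with
    | nil => simp [List.intercalate]
    | cons y ys =>
      subst hxs
      rw [List.cons_append, pv_intercalate_cons, ih (by simp), pv_intercalate_cons sep x (y::ys)]
      simp

theorem pv_intercalate_snoc_app (sep : List Char) (ws : List (List Char)) (w t : List Char) :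
    List.intercalate sep (ws ++ [w ++ t]) = List.intercalate sep (ws ++ [w]) ++ t := by
  cases hws : ws with
  | nil => simp [List.intercalate]
  | cons x xs =>
    rw [← hws, pv_intercalate_snoc sep _ ws (by simp [hws]), pv_intercalate_snoc sep _ ws (by simp [hws])]
    simp

def pvJ (acc : List (List Char)) (cur : List Char) : List Char :=
  List.intercalate [' '] (acc.reverse ++ if cur = [] then [] else [cur.reverse])

def pvP (acc : List (List Char)) (cur : List Char) : Bool :=
  cur.isEmpty && !acc.isEmpty

theorem pvJ_nil_ne (acc : List (List Char)) (hw : ∀ w ∈ acc, w ≠ []) (ha : acc ≠ []) :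
    pvJ acc [] ≠ [] := by
  unfold pvJ
  rw [if_pos rfl, List.append_nil]
  cases hr : acc.reverse with
  | nil => simp at hr; exact absurd hr ha
  | cons x xs =>
    rw [pv_intercalate_cons]
    have hx : x ≠ [] := hw x (by rw [← List.mem_reverse, hr]; simp)
    simp [hx]

theorem pvJ_cur_ne (acc : List (List Char)) (cur : List Char) (hc : cur ≠ []) :
    pvJ acc cur ≠ [] := by
  unfold pvJ
  rw [if_neg hc]
  cases ha : acc.reverse with
  | nil => simp [List.intercalate, hc]
  | cons x xs =>
    rw [← ha, pv_intercalate_snoc _ _ _ (by simp [ha])]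
    simp

theorem pv_main : ∀ (m : List Char), (∀ c ∈ m, c ∉ (['"','{','}'] : List Char)) →
    ∀ (cur : List Char) (acc : List (List Char)), (∀ w ∈ acc, w ≠ []) →
    (List.foldl (fun (st : List Char × Bool) c =>
      if c ∈ (['"','{','}'] : List Char) then st
      else if PySem.Chars.isspace c then (st.1, if st.1.isEmpty then st.2 else true)
      else (st.1 ++ (if st.2 then [' ', c] else [c]), false)) (pvJ acc cur, pvP acc cur) m).1
      = List.intercalate [' '] (PySem.Chars.split₀.go m cur acc) := by
  intro m
  induction m with
  | nil =>
    intro _ cur acc _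
    simp only [List.foldl_nil, PySem.Chars.split₀.go]
    cases cur with
    | nil => simp [pvJ]
    | cons x t => simp [pvJ]
  | cons c rest ih =>
    intro hgood cur acc hacc
    have hc : c ∉ (['"','{','}'] : List Char) := hgood c (by simp)
    have hrest : ∀ x ∈ rest, x ∉ (['"','{','}'] : List Char) := fun x hx => hgood x (by simp [hx])
    simp only [List.foldl_cons, if_neg hc]
    by_cases hsp : PySem.Chars.isspace c = true
    · -- whitespace character
      simp only [hsp, if_pos, PySem.Chars.split₀.go]
      cases cur with
      | nil =>
        simp only [List.isEmpty_nil, if_pos]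
        have hstate : ((pvJ acc ([]:List Char), if (pvJ acc ([]:List Char)).isEmpty then pvP acc ([]:List Char) else true) : List Char × Bool)
            = (pvJ acc [], pvP acc []) := by
          by_cases ha : acc = []
          · subst ha; simp [pvJ, pvP, List.intercalate]
          · have := pvJ_nil_ne acc hacc ha
            simp [pvP, this, List.isEmpty_eq_false_iff, ha]
        rw [hstate]
        exact ih hrest [] acc hacc
      | cons x t =>
        simp only [List.isEmpty_cons, Bool.false_eq_true, if_false]
        have hne : pvJ acc (x::t) ≠ [] := pvJ_cur_ne acc (x::t) (by simp)
        have hstate : ((pvJ acc (x::t), if (pvJ acc (x::t)).isEmpty then pvP acc (x::t) else true) : List Char × Bool)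
            = (pvJ ((x::t).reverse :: acc) [], pvP ((x::t).reverse :: acc) []) := by
          simp only [Prod.mk.injEq]
          refine ⟨by simp [pvJ], ?_⟩
          simp [pvP, List.isEmpty_eq_false_iff, hne]
        rw [hstate]
        exact ih hrest [] ((x::t).reverse :: acc)
          (fun w hw => by
            rcases List.mem_cons.mp hw with h | h
            · simp [h]
            · exact hacc w h)
    · -- ordinary character
      simp only [hsp, Bool.false_eq_true, if_false, PySem.Chars.split₀.go]
      have hstate : ((pvJ acc cur ++ (if pvP acc cur then [' ', c] else [c]), false) : List Char × Bool)
          = (pvJ acc (c::cur), pvP acc (c::cur)) := by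
        simp only [Prod.mk.injEq, pvP, List.isEmpty_cons, Bool.false_and, and_true]
        cases hcur : cur with
        | cons x t =>
          simp only [pvP, List.isEmpty_cons, Bool.false_and, Bool.false_eq_true, if_false]
          show pvJ acc (x::t) ++ [c] = pvJ acc (c::x::t)
          simp only [pvJ, if_neg (by simp : ¬(x::t = ([]:List Char))), if_neg (by simp : ¬(c::x::t = ([]:List Char)))]
          rw [show (c::x::t).reverse = (x::t).reverse ++ [c] by simp]
          rw [pv_intercalate_snoc_app]
        | nil =>
          by_cases ha : acc = []
          · subst ha
            simp [pvP, pvJ, List.intercalate]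
          · have h1 : (!acc.isEmpty) = true := by simp [ha]
            simp only [List.isEmpty_nil, Bool.true_and, h1, if_true]
            show pvJ acc [] ++ [' ', c] = pvJ acc [c]
            simp only [pvJ, if_pos rfl, if_neg (by simp : ¬([c] = ([]:List Char))), List.append_nil]
            rw [pv_intercalate_snoc [' '] [c].reverse acc.reverse (by simp [ha])]
            simp
      rw [hstate]
      exact ih hrest (c::cur) acc hacc

theorem pv_assemble (value : String) : escape_str value = escape_str_alt value := by
  unfold escape_str escape_str_alt
  by_cases he : value.toList.isEmpty
  · simp [he]
  · simp only [he, Bool.false_eq_true, if_false]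
    set l := value.toList with hl
    have hpred : ∀ c : Char,
        (((!(c == '}')) && (!(c == '{'))) && (!(c == '"'))) = !(decide (c ∈ (['"','{','}'] : List Char))) := by
      intro c
      by_cases h1 : c = '"' <;> by_cases h2 : c = '{' <;> by_cases h3 : c = '}' <;> simp [h1, h2, h3]
    -- A's replace chain is one filter
    have hA : [((['"'] : List Char), ([] : List Char)), (['{'], []), (['}'], [])].foldl
        (fun v p => if PySem.Chars.isIn p.1 v then PySem.Chars.replace v p.1 p.2 else v) l
        = l.filter (fun c => !(decide (c ∈ (['"','{','}'] : List Char)))) := by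
      simp only [List.foldl_cons, List.foldl_nil]
      rw [stepA_eq_filter, stepA_eq_filter, stepA_eq_filter, List.filter_filter, List.filter_filter]
      exact List.filter_congr (fun c _ => hpred c)
    rw [hA]
    set m := l.filter (fun c => !(decide (c ∈ (['"','{','}'] : List Char)))) with hm
    -- conditional strip does not change split₀
    have hstrip : ∀ (b : Prop) [Decidable b],
        PySem.Chars.split₀ (if b then PySem.Chars.strip m else m) = PySem.Chars.split₀ m := by
      intro b _
      by_cases hb : b
      · rw [if_pos hb, split₀_strip]
      · rw [if_neg hb]
    rw [hstrip]
    -- B's fold runs over the filtered list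
    have hBstep : (fun (st : List Char × Bool) c =>
        if c ∈ (['"','{','}'] : List Char) then st
        else if PySem.Chars.isspace c then (st.1, if st.1.isEmpty then st.2 else true)
        else (st.1 ++ (if st.2 then [' ', c] else [c]), false))
        = (fun (st : List Char × Bool) c =>
          if (!(decide (c ∈ (['"','{','}'] : List Char)))) = true then
            (if c ∈ (['"','{','}'] : List Char) then st
             else if PySem.Chars.isspace c then (st.1, if st.1.isEmpty then st.2 else true)
             else (st.1 ++ (if st.2 then [' ', c] else [c]), false))
          else st) := by
      funext st c
      by_cases hmem : c ∈ (['"','{','}'] : List Char) <;> simp [hmem]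
    have hB : (l.foldl (fun (st : List Char × Bool) c =>
        if c ∈ (['"','{','}'] : List Char) then st
        else if PySem.Chars.isspace c then (st.1, if st.1.isEmpty then st.2 else true)
        else (st.1 ++ (if st.2 then [' ', c] else [c]), false)) ([], false))
        = m.foldl (fun (st : List Char × Bool) c =>
        if c ∈ (['"','{','}'] : List Char) then st
        else if PySem.Chars.isspace c then (st.1, if st.1.isEmpty then st.2 else true)
        else (st.1 ++ (if st.2 then [' ', c] else [c]), false)) ([], false) := by
      rw [hm, List.foldl_filter, ← hBstep]
    rw [hB]
    have hinit : (([], false) : List Char × Bool) = (pvJ [] [], pvP [] []) := by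
      simp [pvJ, pvP, List.intercalate]
    rw [hinit]
    have hgood : ∀ c ∈ m, c ∉ (['"','{','}'] : List Char) := by
      intro c hcm
      have := List.mem_filter.mp (hm ▸ hcm)
      simpa using this.2
    rw [pv_main m hgood [] [] (by simp)]
    rfl

-- ===== VERDICT (by name: the statement is the Claim_ definition above) =====
theorem escape_str_spec : Claim_equal_escape_str := by
  intro value _ _
  unfold Spec_escape_str
  exact pv_assemble value
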